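-- pv_equiv track=rewrite | github.com/jack-ui22/main.py | init.py | front_decoding
-- ===== SOURCE A (Python) =====
-- def front_decoding(encoded_dict):
--     """
--     对前端编码的词典进行解码
--     """
--     tokens = []
--     prefix = None
--
--     for item in encoded_dict:
--         common_len, data = item
--         if common_len == -1:
--             # -1表示完整词项，作为新块的前缀
--             prefix = data
--             tokens.append(prefix)
--         else:
--             # 根据公共前缀长度和后缀重建词项
--             if prefix is not None:
--                 full_token = prefix[:common_len] + data
--                 tokens.append(full_token)
--
--     return tokens
-- ===== SOURCE B (Python) =====
-- def front_decoding(encoded_dict):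
--     # Phase 1: group the items into blocks (prefix, suffix items); items before
--     # the first -1 entry belong to no block and are discarded.
--     blocks = []
--     cur = None
--     for common_len, data in encoded_dict:
--         if common_len == -1:
--             if cur is not None:
--                 blocks.append(cur)
--             cur = (data, [])
--         elif cur is not None:
--             cur[1].append((common_len, data))
--     if cur is not None:
--         blocks.append(cur)
--     # Phase 2: decode block by block.
--     tokens = []
--     for prefix, suffixes in blocks:
--         tokens.append(prefix)
--         for common_len, data in suffixes:
--             tokens.append(prefix[:common_len] + data)
--     return tokens
-- ===== Notes on version B (the rewrite author's own statement) =====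
-- stated objective: alternative
-- what changed: B replaces A's single stateful pass (mutable current prefix, append-as-you-go) with a two-phase build-then-decode: first group the items into (prefix, suffixes) blocks, discarding items before the first -1, then decode block by block.
import Mathlib
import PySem

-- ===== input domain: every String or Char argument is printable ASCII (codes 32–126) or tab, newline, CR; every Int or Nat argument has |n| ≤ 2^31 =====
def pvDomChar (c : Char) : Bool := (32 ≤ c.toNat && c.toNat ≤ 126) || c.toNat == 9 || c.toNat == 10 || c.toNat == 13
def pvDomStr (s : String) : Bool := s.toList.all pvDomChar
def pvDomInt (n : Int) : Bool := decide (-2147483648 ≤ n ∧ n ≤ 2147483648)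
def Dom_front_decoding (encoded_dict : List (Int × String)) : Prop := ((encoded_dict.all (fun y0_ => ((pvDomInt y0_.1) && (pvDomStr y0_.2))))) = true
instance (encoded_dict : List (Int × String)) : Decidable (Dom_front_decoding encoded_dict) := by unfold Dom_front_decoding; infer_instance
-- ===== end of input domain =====

-- B rebuilds the dictionary in two phases (group into blocks, then decode) instead of A's
-- single stateful pass; same asymptotic cost, alternative structure.

-- shared token formula: prefix[:common_len] + data
def fd_g (p : String) (cl : Int) (d : String) : String :=
  PySem.Str.slice p none (some cl) ++ d

-- ===== PORT A =====
def fd_stepA (st : List String × Option String) (item : Int × String) :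
    List String × Option String :=
  if item.1 = -1 then
    (st.1 ++ [item.2], some item.2)
  else
    match st.2 with
    | some p => (st.1 ++ [fd_g p item.1 item.2], st.2)
    | none => st

def front_decoding (encoded_dict : List (Int × String)) : List String :=
  (encoded_dict.foldl fd_stepA ([], none)).1

-- ===== PORT B =====
def fd_flush (bs : List (String × List (Int × String)))
    (cur : Option (String × List (Int × String))) : List (String × List (Int × String)) :=
  match cur with
  | none => bs
  | some c => bs ++ [c]

def fd_stepB (st : List (String × List (Int × String)) × Option (String × List (Int × String)))
    (item : Int × String) :
    List (String × List (Int × String)) × Option (String × List (Int × String)) :=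
  if item.1 = -1 then
    (fd_flush st.1 st.2, some (item.2, []))
  else
    match st.2 with
    | some (p, sufs) => (st.1, some (p, sufs ++ [item]))
    | none => st

def front_decoding_alt (encoded_dict : List (Int × String)) : List String :=
  let st := encoded_dict.foldl fd_stepB ([], none)
  let blocks := fd_flush st.1 st.2
  blocks.foldl
    (fun acc b => b.2.foldl (fun acc2 it => acc2 ++ [fd_g b.1 it.1 it.2]) (acc ++ [b.1])) []

-- ===== PRECONDITION & SPEC =====
def Spec_front_decoding (encoded_dict : List (Int × String)) (out : List String) : Prop := out = front_decoding_alt encoded_dict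
instance (encoded_dict : List (Int × String)) (out : List String) : Decidable (Spec_front_decoding encoded_dict out) := by unfold Spec_front_decoding; infer_instance

-- ===== CLAIM (what is proved, stated in full; the proofs are below) =====
def Claim_equal_front_decoding : Prop := ∀ (encoded_dict : List (Int × String)), Dom_front_decoding encoded_dict → Spec_front_decoding encoded_dict (front_decoding encoded_dict)

-- ===== LEMMAS AND PROOFS =====

-- semantic reading of a block list: each block contributes its prefix then its decoded suffixes
def fd_decode (bs : List (String × List (Int × String))) : List String :=
  bs.flatMap (fun b => b.1 :: b.2.map (fun it => fd_g b.1 it.1 it.2))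

lemma fd_decode_append (bs : List (String × List (Int × String))) (c : String × List (Int × String)) :
    fd_decode (bs ++ [c]) = fd_decode bs ++ c.1 :: c.2.map (fun it => fd_g c.1 it.1 it.2) := by
  simp [fd_decode]

-- phase 2 of B computes fd_decode
lemma fd_phase2 (bs : List (String × List (Int × String))) (acc : List String) :
    bs.foldl (fun acc b => b.2.foldl (fun acc2 it => acc2 ++ [fd_g b.1 it.1 it.2]) (acc ++ [b.1])) acc
      = acc ++ fd_decode bs := by
  induction bs generalizing acc with
  | nil => simp [fd_decode]
  | cons b bs ih =>
      simp only [List.foldl_cons, PySem.List.foldl_append_singleton_eq_map]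
      simp [fd_decode, List.flatMap]

-- loop invariant: A's accumulated tokens are the decoding of B's flushed state,
-- and A's prefix is the first component of B's open block
lemma fd_inv (l : List (Int × String)) (bs : List (String × List (Int × String)))
    (cur : Option (String × List (Int × String))) :
    (l.foldl fd_stepA (fd_decode (fd_flush bs cur), cur.map Prod.fst)).1
      = fd_decode (fd_flush (l.foldl fd_stepB (bs, cur)).1 (l.foldl fd_stepB (bs, cur)).2) := by
  induction l generalizing bs cur with
  | nil => simp
  | cons item l ih =>
      by_cases h : item.1 = -1
      · have hA : fd_stepA (fd_decode (fd_flush bs cur), cur.map Prod.fst) item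
            = (fd_decode (fd_flush (fd_flush bs cur) (some (item.2, []))),
               (some ((item.2 : String), ([] : List (Int × String)))).map Prod.fst) := by
          simp [fd_stepA, h, fd_flush, fd_decode_append]
        have hB : fd_stepB (bs, cur) item = (fd_flush bs cur, some (item.2, [])) := by
          simp [fd_stepB, h]
        simp only [List.foldl_cons, hA, hB]
        exact ih (fd_flush bs cur) (some (item.2, []))
      · cases cur with
        | none =>
            have hA : fd_stepA (fd_decode (fd_flush bs none), (none : Option (String × List (Int × String))).map Prod.fst) item
                = (fd_decode (fd_flush bs none), (none : Option (String × List (Int × String))).map Prod.fst) := by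
              simp [fd_stepA, h]
            have hB : fd_stepB (bs, none) item = (bs, none) := by
              simp [fd_stepB, h]
            simp only [List.foldl_cons, hA, hB]
            exact ih bs none
        | some c =>
            obtain ⟨p, sufs⟩ := c
            have hA : fd_stepA (fd_decode (fd_flush bs (some (p, sufs))), (some (p, sufs)).map Prod.fst) item
                = (fd_decode (fd_flush bs (some (p, sufs ++ [item]))),
                   (some ((p : String), sufs ++ [item])).map Prod.fst) := by
              simp [fd_stepA, h, fd_flush, fd_decode_append]
            have hB : fd_stepB (bs, some (p, sufs)) item = (bs, some (p, sufs ++ [item])) := by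
              simp [fd_stepB, h]
            simp only [List.foldl_cons, hA, hB]
            exact ih bs (some (p, sufs ++ [item]))

-- ===== VERDICT (by name: the statement is the Claim_ definition above) =====
theorem front_decoding_spec : Claim_equal_front_decoding := by
  intro l _
  show front_decoding l = front_decoding_alt l
  simp only [front_decoding, front_decoding_alt]
  rw [fd_phase2, List.nil_append]
  simpa [fd_flush, fd_decode] using fd_inv l [] none
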